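-- pv_equiv track=rewrite | github.com/veya2ztn/Metasurface | model/FWD_MYFPN.py | config_list
-- ===== SOURCE A (Python) =====
-- def config_list(size,stride):
--     record=[]
--     s = stride
--     for p in range(1,size//2):
--         for d in range(1,2*p+s-1+16):
--             if (2*p+s-1)%d !=0:continue
--             record.append([d,(2*p+s-1)//d+1])
--     return  record
-- ===== SOURCE B (Python) =====
-- def config_list(size, stride):
--     record = []
--     for p in range(1, size // 2):
--         n = 2 * p + stride - 1
--         if n <= 0:
--             continue
--         small = []
--         large = []
--         d = 1
--         while d * d <= n:
--             if n % d == 0: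
--                 q = n // d
--                 small.append([d, q + 1])
--                 if q != d:
--                     large.append([q, d + 1])
--             d += 1
--         record.extend(small)
--         record.extend(reversed(large))
--     return record
-- ===== Notes on version B (the rewrite author's own statement) =====
-- stated objective: faster
-- what changed: Per p, instead of scanning every candidate d in 1..n+15 (n=2p+stride-1), B enumerates divisors only up to sqrt(n), emitting each small divisor and queueing its cofactor, then appends the cofactors in reverse to keep ascending order; nonpositive n are skipped.
-- intended difference: When some p in range(1,size//2) has -14 <= 2p+stride-1 <= 0 (only possible for negative stride), A's d-scan up to n+15 emits bogus pairs for the nonpositive value n (e.g. fifteen [d,1] pairs when n==0), an artefact of the +16 slack in its loop bound; B emits nothing for such p, which is the intended 'divisor pairs of n' behaviour. — e.g. on config_list(4, -1): A returns [[1, 1], [2, 1], [3, 1], [4, 1], [5, 1], [6, 1], [7, 1], [8, 1], [9, 1], [10, 1], [11, 1], [12, 1], [13, 1], [14, 1], […, B returns []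
import Mathlib
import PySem

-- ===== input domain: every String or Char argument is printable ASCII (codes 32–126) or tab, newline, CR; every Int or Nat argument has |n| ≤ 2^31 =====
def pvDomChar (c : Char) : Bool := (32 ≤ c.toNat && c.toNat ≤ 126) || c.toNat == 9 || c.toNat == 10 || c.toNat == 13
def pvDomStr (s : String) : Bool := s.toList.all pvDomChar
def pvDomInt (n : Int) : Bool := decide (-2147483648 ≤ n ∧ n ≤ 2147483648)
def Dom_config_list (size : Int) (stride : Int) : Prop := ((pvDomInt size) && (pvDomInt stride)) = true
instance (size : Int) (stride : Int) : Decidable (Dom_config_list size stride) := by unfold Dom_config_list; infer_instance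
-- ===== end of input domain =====

-- B replaces A's per-p linear scan of all candidates d ≤ n+15 by divisor enumeration up to √n
-- (emitting cofactors in reverse to keep ascending order) and skips nonpositive n; faster, with a
-- stated intended difference (D_) on the nonpositive-n corner where A's +16 slack emits bogus pairs.


-- ===== PORT A =====
def config_list (size : Int) (stride : Int) : List (List Int) :=
  (PySem.List.pyRange 1 (PySem.Int.floordiv size 2) 1).foldl (fun record p =>
    (PySem.List.pyRange 1 (2 * p + stride - 1 + 16) 1).foldl (fun record d =>
      if PySem.Int.mod (2 * p + stride - 1) d ≠ 0 then record
      else record ++ [[d, PySem.Int.floordiv (2 * p + stride - 1) d + 1]]) record) []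

-- ===== PORT B =====
-- while-loop of Source B; the Nat fuel only makes the recursion total (it never runs out: the loop
-- stops once d*d > n and is started with fuel n.toNat+1)
def altLoop (n : Int) : Nat → Int → List (List Int) → List (List Int) → List (List Int) × List (List Int)
  | 0, _, small, large => (small, large)
  | fuel + 1, d, small, large =>
    if d * d ≤ n then
      (if PySem.Int.mod n d = 0 then
        let q := PySem.Int.floordiv n d
        altLoop n fuel (d + 1) (small ++ [[d, q + 1]])
          (if q ≠ d then large ++ [[q, d + 1]] else large)
      else altLoop n fuel (d + 1) small large)
    else (small, large)

def config_list_alt (size : Int) (stride : Int) : List (List Int) :=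
  (PySem.List.pyRange 1 (PySem.Int.floordiv size 2) 1).foldl (fun record p =>
    let n := 2 * p + stride - 1
    if n ≤ 0 then record
    else
      let sl := altLoop n (n.toNat + 1) 1 [] []
      record ++ sl.1 ++ sl.2.reverse) []

-- ===== PRECONDITION & SPEC =====
-- When some p in range(1,size//2) has -14 ≤ 2p+stride-1 ≤ 0 (possible only for negative stride),
-- A's scan of d up to n+15 emits bogus pairs for the nonpositive value n = 2p+stride-1 (e.g. fifteen
-- [d,1] pairs when n = 0) — an artefact of the +16 slack in its loop bound; B emits nothing for such
-- p, the intended 'divisor pairs of n' behaviour.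
-- 'some p in range(1, size//2) has -14 ≤ 2p+stride-1 ≤ 0', written as nonemptiness of the
-- interval of such p (integer interval [a,b] is nonempty iff a ≤ b; /-here- is Int.ediv, = floor for
-- the positive divisor 2)
def D_config_list (size : Int) (stride : Int) : Prop :=
  max 1 (-((13 + stride) / 2)) ≤ min ((size - 2) / 2) ((1 - stride) / 2)
instance (size : Int) (stride : Int) : Decidable (D_config_list size stride) := by
  unfold D_config_list; infer_instance

def Spec_config_list (size : Int) (stride : Int) (out : List (List Int)) : Prop :=
  ¬ D_config_list size stride → out = config_list_alt size stride
instance (size : Int) (stride : Int) (out : List (List Int)) : Decidable (Spec_config_list size stride out) := by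
  unfold Spec_config_list; infer_instance

def pvDiffWitness_config_list : Int × Int := (4, -1)
def pvDiffWitnessOut_config_list : (List (List Int)) × (List (List Int)) :=
  ([[1, 1], [2, 1], [3, 1], [4, 1], [5, 1], [6, 1], [7, 1], [8, 1], [9, 1], [10, 1],
    [11, 1], [12, 1], [13, 1], [14, 1], [15, 1]], [])

-- ===== CLAIM (what is proved, stated in full; the proofs are below) =====
def Claim_unchanged_config_list : Prop := ∀ (size : Int) (stride : Int), Dom_config_list size stride → Spec_config_list size stride (config_list size stride)
def Claim_changed_config_list : Prop := Dom_config_list (pvDiffWitness_config_list.1) (pvDiffWitness_config_list.2) ∧ D_config_list (pvDiffWitness_config_list.1) (pvDiffWitness_config_list.2) ∧ config_list (pvDiffWitness_config_list.1) (pvDiffWitness_config_list.2) = pvDiffWitnessOut_config_list.1 ∧ config_list_alt (pvDiffWitness_config_list.1) (pvDiffWitness_config_list.2) = pvDiffWitnessOut_config_list.2 ∧ pvDiffWitnessOut_config_list.1 ≠ pvDiffWitnessOut_config_list.2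
def Claim_exact_config_list : Prop := ∀ (size : Int) (stride : Int), Dom_config_list size stride → D_config_list size stride → config_list size stride ≠ config_list_alt size stride

-- ===== LEMMAS AND PROOFS =====

-- helpers used only by the proofs
def pvR (n : Int) : Int := ((Int.toNat n).sqrt : Int)

lemma pvR_nonneg (n : Int) : 0 ≤ pvR n := by simp [pvR]

lemma pvR_sq_le (n : Int) (hn : 0 ≤ n) : pvR n * pvR n ≤ n := by
  have h := Nat.sqrt_le n.toNat
  have h2 : ((Nat.sqrt n.toNat * Nat.sqrt n.toNat : Nat) : Int) ≤ ((n.toNat : Nat) : Int) := by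
    exact_mod_cast h
  rw [Int.toNat_of_nonneg hn] at h2
  push_cast at h2
  simpa [pvR] using h2

lemma lt_pvR_succ_sq (n : Int) (hn : 0 ≤ n) : n < (pvR n + 1) * (pvR n + 1) := by
  have h := Nat.lt_succ_sqrt n.toNat
  have h2 : ((n.toNat : Nat) : Int) < (((Nat.sqrt n.toNat + 1) * (Nat.sqrt n.toNat + 1) : Nat) : Int) := by
    exact_mod_cast h
  rw [Int.toNat_of_nonneg hn] at h2
  push_cast at h2
  simpa [pvR] using h2

lemma le_pvR_iff (n d : Int) (hn : 0 ≤ n) (hd : 1 ≤ d) : d ≤ pvR n ↔ d * d ≤ n := by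
  constructor <;> intro h
  · nlinarith [pvR_sq_le n hn, pvR_nonneg n]
  · nlinarith [lt_pvR_succ_sq n hn, pvR_nonneg n]

lemma fd_mul_eq (n d : Int) (h : PySem.Int.mod n d = 0) : PySem.Int.floordiv n d * d = n := by
  have h2 := PySem.Int.floordiv_mul_add_mod n d
  omega

lemma fd_of_mul (n d q : Int) (hd : 1 ≤ d) (h : q * d = n) : PySem.Int.floordiv n d = q := by
  have h2 := PySem.Int.floordiv_mul_add_mod n d
  have hm1 := PySem.Int.mod_nonneg n (b := d) (by omega)
  have hm2 := PySem.Int.mod_lt n (b := d) (by omega)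
  set f := PySem.Int.floordiv n d with hf
  set m := PySem.Int.mod n d with hm
  rcases lt_trichotomy f q with h3 | h3 | h3
  · exfalso; nlinarith
  · exact h3
  · exfalso; nlinarith

def pvF (n d : Int) : List Int := [d, PySem.Int.floordiv n d + 1]

lemma altLoop_spec (n : Int) (hn : 1 ≤ n) :
    ∀ (fuel : Nat) (d : Int) (small large : List (List Int)), 1 ≤ d → pvR n + 1 ≤ d + fuel →
    altLoop n fuel d small large =
      (small ++ ((PySem.List.pyRange d (pvR n + 1) 1).filter
          (fun e => decide (PySem.Int.mod n e = 0))).map (pvF n),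
       large ++ ((PySem.List.pyRange d (pvR n + 1) 1).filter
          (fun e => decide (PySem.Int.mod n e = 0) && decide (PySem.Int.floordiv n e ≠ e))).map
          (fun e => [PySem.Int.floordiv n e, e + 1])) := by
  intro fuel
  induction fuel with
  | zero =>
    intro d small large hd hfuel
    rw [PySem.List.pyRange_one_eq_nil (by omega)]
    simp [altLoop]
  | succ fuel ih =>
    intro d small large hd hfuel
    by_cases hsq : d * d ≤ n
    · have hdR : d ≤ pvR n := (le_pvR_iff n d (by omega) hd).mpr hsq
      rw [show altLoop n (fuel+1) d small large =
        (if d * d ≤ n then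
          (if PySem.Int.mod n d = 0 then
            altLoop n fuel (d + 1) (small ++ [[d, PySem.Int.floordiv n d + 1]])
              (if PySem.Int.floordiv n d ≠ d then large ++ [[PySem.Int.floordiv n d, d + 1]] else large)
          else altLoop n fuel (d + 1) small large)
        else (small, large)) from rfl]
      rw [if_pos hsq, PySem.List.pyRange_one_cons (by omega)]
      by_cases hmod : PySem.Int.mod n d = 0
      · rw [if_pos hmod, ih (d+1) _ _ (by omega) (by omega)]
        by_cases hq : PySem.Int.floordiv n d ≠ d <;>
          simp [hq, hmod, pvF, List.append_assoc]
      · rw [if_neg hmod, ih (d+1) _ _ (by omega) (by omega)]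
        simp [hmod]
    · have hdR : ¬ d ≤ pvR n := fun h => hsq ((le_pvR_iff n d (by omega) hd).mp h)
      rw [show altLoop n (fuel+1) d small large =
        (if d * d ≤ n then
          (if PySem.Int.mod n d = 0 then
            altLoop n fuel (d + 1) (small ++ [[d, PySem.Int.floordiv n d + 1]])
              (if PySem.Int.floordiv n d ≠ d then large ++ [[PySem.Int.floordiv n d, d + 1]] else large)
          else altLoop n fuel (d + 1) small large)
        else (small, large)) from rfl]
      rw [if_neg hsq, PySem.List.pyRange_one_eq_nil (by omega)]
      simp

def pvDivs (n a b : Int) : List Int :=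
  (PySem.List.pyRange a b 1).filter (fun d => decide (PySem.Int.mod n d = 0))

def pvL (n : Int) : List Int :=
  (PySem.List.pyRange 1 (pvR n + 1) 1).filter
    (fun e => decide (PySem.Int.mod n e = 0) && decide (PySem.Int.floordiv n e ≠ e))

def pvBigs (n : Int) : List Int := ((pvL n).map (fun e => PySem.Int.floordiv n e)).reverse

lemma mod_zero_iff (n e : Int) : PySem.Int.mod n e = 0 ↔ e ∣ n := PySem.Int.mod_eq_zero_iff_dvd n e

lemma mem_divs (n x : Int) (_hn : 1 ≤ n) : x ∈ pvDivs n 1 (n + 1) ↔ 1 ≤ x ∧ x ≤ n ∧ x ∣ n := by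
  simp only [pvDivs, List.mem_filter, PySem.List.mem_pyRange_one, decide_eq_true_eq, mod_zero_iff]
  constructor
  · rintro ⟨⟨h1, h2⟩, h3⟩; exact ⟨h1, by omega, h3⟩
  · rintro ⟨h1, h2, h3⟩; exact ⟨⟨h1, by omega⟩, h3⟩

lemma mem_smalls (n x : Int) (_hn : 1 ≤ n) : x ∈ pvDivs n 1 (pvR n + 1) ↔ 1 ≤ x ∧ x ≤ pvR n ∧ x ∣ n := by
  simp only [pvDivs, List.mem_filter, PySem.List.mem_pyRange_one, decide_eq_true_eq, mod_zero_iff]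
  constructor
  · rintro ⟨⟨h1, h2⟩, h3⟩; exact ⟨h1, by omega, h3⟩
  · rintro ⟨h1, h2, h3⟩; exact ⟨⟨h1, by omega⟩, h3⟩

lemma mem_pvL (n e : Int) (_hn : 1 ≤ n) :
    e ∈ pvL n ↔ (1 ≤ e ∧ e ≤ pvR n ∧ e ∣ n) ∧ PySem.Int.floordiv n e ≠ e := by
  simp only [pvL, List.mem_filter, PySem.List.mem_pyRange_one, Bool.and_eq_true,
    decide_eq_true_eq, mod_zero_iff]
  constructor
  · rintro ⟨⟨h1, h2⟩, h3, h4⟩; exact ⟨⟨h1, by omega, h3⟩, h4⟩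
  · rintro ⟨⟨h1, h2, h3⟩, h4⟩; exact ⟨⟨h1, by omega⟩, h3, h4⟩

-- the cofactor of a member of pvL is a divisor strictly above pvR n
lemma pvL_cofactor (n e : Int) (hn : 1 ≤ n) (he : e ∈ pvL n) :
    1 ≤ PySem.Int.floordiv n e ∧ PySem.Int.floordiv n e ≤ n ∧ PySem.Int.floordiv n e ∣ n ∧
      pvR n + 1 ≤ PySem.Int.floordiv n e ∧ PySem.Int.floordiv n e * e = n := by
  obtain ⟨⟨h1, h2, h3⟩, h4⟩ := (mem_pvL n e hn).mp he
  set q := PySem.Int.floordiv n e with hq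
  have hmul : q * e = n := fd_mul_eq n e ((mod_zero_iff n e).mpr h3)
  have hqpos : 1 ≤ q := by nlinarith
  have hqdvd : q ∣ n := ⟨e, by linarith [hmul]⟩
  have hqle : q ≤ n := Int.le_of_dvd (by omega) hqdvd
  have hRsq := pvR_sq_le n (by omega)
  have hR1 := pvR_nonneg n
  have hqR : pvR n + 1 ≤ q := by
    by_contra hcon
    push Not at hcon
    have hqleR : q ≤ pvR n := by omega
    rcases lt_trichotomy q e with h5 | h5 | h5
    · nlinarith
    · exact h4 (by omega)
    · nlinarith
  exact ⟨hqpos, hqle, hqdvd, hqR, hmul⟩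

lemma mem_pvBigs (n x : Int) (hn : 1 ≤ n) :
    x ∈ pvBigs n ↔ pvR n + 1 ≤ x ∧ x ≤ n ∧ x ∣ n := by
  simp only [pvBigs, List.mem_reverse, List.mem_map]
  constructor
  · rintro ⟨e, he, rfl⟩
    obtain ⟨h1, h2, h3, h4, _⟩ := pvL_cofactor n e hn he
    exact ⟨h4, h2, h3⟩
  · rintro ⟨h1, h2, h3⟩
    obtain ⟨e, he⟩ := h3
    have hR1 := pvR_nonneg n
    have hxpos : 1 ≤ x := by omega
    have hepos : 1 ≤ e := by nlinarith
    have hfd : PySem.Int.floordiv n x = e := fd_of_mul n x e hxpos (by linarith [he, mul_comm x e])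
    have heR : e ≤ pvR n := by
      by_contra hcon
      push Not at hcon
      have := lt_pvR_succ_sq n (by omega)
      nlinarith
    have hfde : PySem.Int.floordiv n e = x := fd_of_mul n e x hepos (by linarith [he, mul_comm x e])
    refine ⟨e, (mem_pvL n e hn).mpr ⟨⟨hepos, heR, ⟨x, by linarith [he, mul_comm x e]⟩⟩, by omega⟩, hfde⟩

lemma nodup_divs (n a b : Int) : (pvDivs n a b).Nodup :=
  (PySem.List.nodup_pyRange_one a b).filter _

lemma pairwise_divs (n a b : Int) : (pvDivs n a b).Pairwise (· < ·) :=
  (PySem.List.pairwise_lt_pyRange_one a b).filter _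

lemma nodup_pvL (n : Int) : (pvL n).Nodup :=
  (PySem.List.nodup_pyRange_one _ _).filter _

lemma pairwise_pvL (n : Int) : (pvL n).Pairwise (· < ·) :=
  (PySem.List.pairwise_lt_pyRange_one _ _).filter _

lemma nodup_pvBigs (n : Int) (hn : 1 ≤ n) : (pvBigs n).Nodup := by
  rw [pvBigs, List.nodup_reverse]
  refine List.Nodup.map_on ?_ (nodup_pvL n)
  intro e1 h1 e2 h2 heq
  obtain ⟨_, _, _, _, hm1⟩ := pvL_cofactor n e1 hn h1
  obtain ⟨hq2, _, _, _, hm2⟩ := pvL_cofactor n e2 hn h2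
  rw [heq] at hm1
  have : PySem.Int.floordiv n e2 ≠ 0 := by omega
  exact mul_left_cancel₀ this (hm1.trans hm2.symm)

lemma pairwise_pvBigs (n : Int) (hn : 1 ≤ n) : (pvBigs n).Pairwise (· < ·) := by
  rw [pvBigs, List.pairwise_reverse, List.pairwise_map]
  refine List.Pairwise.imp_of_mem ?_ (pairwise_pvL n)
  intro a b ha hb hab
  obtain ⟨hqa, _, _, _, hma⟩ := pvL_cofactor n a hn ha
  obtain ⟨hqb, _, _, _, hmb⟩ := pvL_cofactor n b hn hb
  obtain ⟨⟨ha1, _, _⟩, _⟩ := (mem_pvL n a hn).mp ha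
  show PySem.Int.floordiv n b < PySem.Int.floordiv n a
  nlinarith

lemma divs_split (n : Int) (hn : 1 ≤ n) :
    pvDivs n 1 (n + 1) = pvDivs n 1 (pvR n + 1) ++ pvBigs n := by
  refine List.Perm.eq_of_pairwise (le := (· ≤ ·)) (fun a b _ _ h1 h2 => le_antisymm h1 h2)
    ((pairwise_divs n 1 (n+1)).imp le_of_lt) ?_ ?_
  · refine List.pairwise_append.mpr ⟨(pairwise_divs n 1 (pvR n + 1)).imp le_of_lt,
      (pairwise_pvBigs n hn).imp le_of_lt, ?_⟩
    intro x hx y hy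
    have h1 := (mem_smalls n x hn).mp hx
    have h2 := (mem_pvBigs n y hn).mp hy
    omega
  · refine List.perm_of_nodup_nodup_toFinset_eq (nodup_divs n 1 (n+1)) ?_ ?_
    · refine List.Nodup.append (nodup_divs n 1 (pvR n + 1)) (nodup_pvBigs n hn) ?_
      intro x hx hy
      have h1 := (mem_smalls n x hn).mp hx
      have h2 := (mem_pvBigs n x hn).mp hy
      omega
    · ext x
      simp only [List.mem_toFinset, List.mem_append, mem_divs n x hn, mem_smalls n x hn,
        mem_pvBigs n x hn]
      constructor
      · rintro ⟨h1, h2, h3⟩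
        by_cases hx : x ≤ pvR n
        · exact Or.inl ⟨h1, hx, h3⟩
        · exact Or.inr ⟨by omega, h2, h3⟩
      · rintro (⟨h1, h2, h3⟩ | ⟨h1, h2, h3⟩)
        · exact ⟨h1, Int.le_of_dvd (by omega) h3, h3⟩
        · have := pvR_nonneg n
          exact ⟨by omega, h2, h3⟩

lemma divs_trim (n : Int) (hn : 1 ≤ n) : pvDivs n 1 (n + 16) = pvDivs n 1 (n + 1) := by
  unfold pvDivs
  rw [PySem.List.pyRange_one_append 1 (n+1) (n+16) (by omega) (by omega), List.filter_append]
  have h : (PySem.List.pyRange (n+1) (n+16) 1).filter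
      (fun d => decide (PySem.Int.mod n d = 0)) = [] := by
    rw [List.filter_eq_nil_iff]
    intro e he
    rw [PySem.List.mem_pyRange_one] at he
    simp only [decide_eq_true_eq]
    rw [PySem.Int.mod_eq_emod_of_pos (by omega), Int.emod_eq_of_lt (by omega) (by omega)]
    omega
  rw [h, List.append_nil]

lemma pvR_le_self (n : Int) (hn : 1 ≤ n) : pvR n ≤ n := by
  have h1 := pvR_sq_le n (by omega)
  have h2 := pvR_nonneg n
  nlinarith

def pvSegA (n : Int) : List (List Int) := (pvDivs n 1 (n + 16)).map (pvF n)
def pvSegB (n : Int) : List (List Int) :=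
  if n ≤ 0 then []
  else (altLoop n (n.toNat + 1) 1 [] []).1 ++ (altLoop n (n.toNat + 1) 1 [] []).2.reverse

lemma seg_eq_of_pos (n : Int) (hn : 1 ≤ n) : pvSegA n = pvSegB n := by
  have hfuel : pvR n + 1 ≤ 1 + (n.toNat + 1 : Nat) := by
    have := pvR_le_self n hn; omega
  have hspec := altLoop_spec n hn (n.toNat + 1) 1 [] [] (by omega) hfuel
  rw [pvSegB, if_neg (by omega), hspec]
  simp only [List.nil_append]
  rw [pvSegA, divs_trim n hn, divs_split n hn, List.map_append]
  congr 1
  rw [pvBigs, List.map_reverse, List.map_map]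
  congr 1
  refine List.map_congr_left ?_
  intro e he
  obtain ⟨hq1, _, _, _, hmul⟩ := pvL_cofactor n e hn he
  obtain ⟨⟨he1, _, _⟩, _⟩ := (mem_pvL n e hn).mp he
  simp only [Function.comp_apply, pvF]
  rw [fd_of_mul n (PySem.Int.floordiv n e) e hq1 (by nlinarith)]

lemma segA_pos_len (n : Int) (h1 : -14 ≤ n) (h2 : n ≤ 0) : pvSegA n ≠ [] := by
  have hmod : PySem.Int.mod n 1 = 0 := by
    have h3 := PySem.Int.floordiv_mul_add_mod n 1
    have h4 := PySem.Int.mod_nonneg n (b := 1) (by omega)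
    have h5 := PySem.Int.mod_lt n (b := 1) (by omega)
    omega
  have hmem : (1 : Int) ∈ pvDivs n 1 (n + 16) := by
    rw [pvDivs, List.mem_filter, PySem.List.mem_pyRange_one]
    exact ⟨⟨le_refl 1, by omega⟩, by simp⟩
  intro hcon
  rw [pvSegA] at hcon
  have := List.map_eq_nil_iff.mp hcon
  rw [this] at hmem
  exact List.not_mem_nil hmem

lemma innerA (n : Int) (l : List Int) (acc : List (List Int)) :
    l.foldl (fun record d => if PySem.Int.mod n d ≠ 0 then record
      else record ++ [[d, PySem.Int.floordiv n d + 1]]) acc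
      = acc ++ (l.filter (fun d => decide (PySem.Int.mod n d = 0))).map (pvF n) := by
  have h : (fun (record : List (List Int)) d => if PySem.Int.mod n d ≠ 0 then record
        else record ++ [[d, PySem.Int.floordiv n d + 1]])
      = fun record d => if PySem.Int.mod n d = 0 then record ++ [pvF n d] else record := by
    funext record d
    by_cases h : PySem.Int.mod n d = 0 <;> simp [h, pvF]
  rw [h, PySem.List.foldl_append_ite]


lemma seg_eq_of_neg (n : Int) (hn : n ≤ -15) : pvSegA n = pvSegB n := by
  rw [pvSegA, pvDivs, PySem.List.pyRange_one_eq_nil (by omega), pvSegB, if_pos (by omega)]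
  simp

lemma A_flatMap (size stride : Int) :
    config_list size stride =
      (PySem.List.pyRange 1 (PySem.Int.floordiv size 2) 1).flatMap
        (fun p => pvSegA (2 * p + stride - 1)) := by
  rw [config_list]
  have h : (fun (record : List (List Int)) p =>
        (PySem.List.pyRange 1 (2 * p + stride - 1 + 16) 1).foldl (fun record d =>
          if PySem.Int.mod (2 * p + stride - 1) d ≠ 0 then record
          else record ++ [[d, PySem.Int.floordiv (2 * p + stride - 1) d + 1]]) record)
      = fun record p => record ++ pvSegA (2 * p + stride - 1) := by
    funext record p
    rw [innerA]
    simp only [pvSegA, pvDivs]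
  rw [h, PySem.List.foldl_append_eq_flatMap, List.nil_append]

lemma B_flatMap (size stride : Int) :
    config_list_alt size stride =
      (PySem.List.pyRange 1 (PySem.Int.floordiv size 2) 1).flatMap
        (fun p => pvSegB (2 * p + stride - 1)) := by
  rw [config_list_alt]
  have h : (fun (record : List (List Int)) p =>
        let n := 2 * p + stride - 1
        if n ≤ 0 then record
        else
          let sl := altLoop n (n.toNat + 1) 1 [] []
          record ++ sl.1 ++ sl.2.reverse)
      = fun record p => record ++ pvSegB (2 * p + stride - 1) := by
    funext record p
    by_cases h : 2 * p + stride - 1 ≤ 0 <;> simp [pvSegB, h, List.append_assoc]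
  rw [h, PySem.List.foldl_append_eq_flatMap, List.nil_append]

lemma segB_len_le (m : Int) : (pvSegB m).length ≤ (pvSegA m).length := by
  by_cases h : m ≤ 0
  · rw [pvSegB, if_pos h]; simp
  · rw [← seg_eq_of_pos m (by omega)]

-- ===== VERDICT (by name: the statement is the Claim_ definition above) =====
theorem config_list_spec : Claim_unchanged_config_list := by
  intro size stride _ hD
  rw [A_flatMap, B_flatMap]
  refine List.flatMap_congr ?_
  intro p hp
  rw [PySem.List.mem_pyRange_one,
    PySem.Int.floordiv_eq_ediv_of_pos (a := size) (by omega)] at hp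
  have : ¬ (-14 ≤ 2 * p + stride - 1 ∧ 2 * p + stride - 1 ≤ 0) := by
    intro h
    exact hD (by unfold D_config_list; omega)
  rcases (by omega : 1 ≤ 2 * p + stride - 1 ∨ 2 * p + stride - 1 ≤ -15) with h | h
  · exact seg_eq_of_pos _ h
  · exact seg_eq_of_neg _ h

theorem config_list_changed : Claim_changed_config_list := by
  unfold Claim_changed_config_list; decide

theorem config_list_tight : Claim_exact_config_list := by
  intro size stride _ hD heq
  unfold D_config_list at hD
  set p0 : Int := max 1 (-((13 + stride) / 2)) with hp0def
  have hc1 : -14 ≤ 2 * p0 + stride - 1 := by omega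
  have hc2 : 2 * p0 + stride - 1 ≤ 0 := by omega
  have hp0 : p0 ∈ PySem.List.pyRange 1 (PySem.Int.floordiv size 2) 1 := by
    rw [PySem.List.mem_pyRange_one,
      PySem.Int.floordiv_eq_ediv_of_pos (a := size) (by omega)]
    omega
  have hlen := congrArg List.length heq
  rw [A_flatMap, B_flatMap, List.length_flatMap, List.length_flatMap] at hlen
  have hlt : ((PySem.List.pyRange 1 (PySem.Int.floordiv size 2) 1).map
        (fun p => (pvSegB (2 * p + stride - 1)).length)).sum
      < ((PySem.List.pyRange 1 (PySem.Int.floordiv size 2) 1).map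
        (fun p => (pvSegA (2 * p + stride - 1)).length)).sum := by
    refine List.sum_lt_sum _ _ (fun p _ => segB_len_le _) ⟨p0, hp0, ?_⟩
    rw [pvSegB, if_pos (by omega)]
    simp only [List.length_nil]
    exact List.length_pos_iff.mpr (segA_pos_len _ hc1 hc2)
  omega
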